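-- pv_equiv track=rewrite | github.com/cjulian1/Quaver | generate_chords.py | getPossibleChords
-- ===== SOURCE A (Python) =====
-- chords = {
--     "Cmaj": [60, 64, 67],
--     "Cmin": [60, 63, 67],
--     "Cmaj7": [60, 64, 67, 71],
--     "Dmaj": [62, 66, 69],
--     "Dmin": [62, 65, 69],
--     "Dmin7": [62, 65, 69, 72],
--     "Emaj": [64, 68, 71],
--     "Emin": [64, 67, 71],
--     "Emin7": [64, 67, 71, 74],
--     "Fmaj": [65, 69, 72],
--     "Fmin": [65, 68, 72],
--     "Fmaj7": [65, 69, 72, 76],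
--     "Gmaj": [67, 71, 74],
--     "Gmin": [67, 70, 74],
--     "Gmm7": [67, 71, 74, 77],
--     "Amaj": [69, 73, 76],
--     "Amin": [69, 72, 76],
--     "Amin7": [69, 72, 76, 79],
--     "Amm7": [69, 73, 76, 79]
-- }
--
-- def checkIfInChord(note, chord):    # check if note is in any of the chord notes (ignores octaves)
--     return any((note % 12) == (chordNote % 12) for chordNote in chord)
--
-- def getPossibleChords(notePair):    # gets chords that have at least one note from the input notes in the chord
--     possibleChords = []
--     for chordName, chordNotes, in chords.items():
--         matchCount = sum(1 for note in notePair if (checkIfInChord(note, chordNotes)))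
--
--         if (matchCount > 0):
--             possibleChords.append((chordName, matchCount))
--
--     possibleChords.sort(key=lambda x: -x[1])    # sort in decending order
--     return [chord[0] for chord in possibleChords]
-- ===== SOURCE B (Python) =====
-- chords = {
--     "Cmaj": [60, 64, 67],
--     "Cmin": [60, 63, 67],
--     "Cmaj7": [60, 64, 67, 71],
--     "Dmaj": [62, 66, 69],
--     "Dmin": [62, 65, 69],
--     "Dmin7": [62, 65, 69, 72],
--     "Emaj": [64, 68, 71],
--     "Emin": [64, 67, 71],
--     "Emin7": [64, 67, 71, 74],
--     "Fmaj": [65, 69, 72],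
--     "Fmin": [65, 68, 72],
--     "Fmaj7": [65, 69, 72, 76],
--     "Gmaj": [67, 71, 74],
--     "Gmin": [67, 70, 74],
--     "Gmm7": [67, 71, 74, 77],
--     "Amaj": [69, 73, 76],
--     "Amin": [69, 72, 76],
--     "Amin7": [69, 72, 76, 79],
--     "Amm7": [69, 73, 76, 79]
-- }
--
-- def _buildPitchClassIndex():
--     # pitch class (0-11) -> deduplicated list of chord names containing that pitch class
--     index = {pc: [] for pc in range(12)}
--     for name, notes in chords.items():
--         for n in notes:
--             if name not in index[n % 12]:
--                 index[n % 12].append(name)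
--     return index
--
-- _PC_INDEX = _buildPitchClassIndex()
--
-- def getPossibleChords(notePair):
--     # drive the loop by the input notes, tallying via the inverted pitch-class index
--     counts = {}
--     for note in notePair:
--         for name in _PC_INDEX[note % 12]:
--             counts[name] = counts.get(name, 0) + 1
--     pairs = [(name, counts.get(name, 0)) for name in chords if counts.get(name, 0) > 0]
--     pairs.sort(key=lambda p: -p[1])   # stable descending by match count
--     return [name for name, _ in pairs]
-- ===== Notes on version B (the rewrite author's own statement) =====
-- stated objective: faster
-- what changed: B inverts the traversal: a precomputed pitch-class->chord-names inverted index is scanned once per input note to build a counter dict, instead of A's per-chord rescans of the whole note list with a modular comparison per chord note.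
import Mathlib
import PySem

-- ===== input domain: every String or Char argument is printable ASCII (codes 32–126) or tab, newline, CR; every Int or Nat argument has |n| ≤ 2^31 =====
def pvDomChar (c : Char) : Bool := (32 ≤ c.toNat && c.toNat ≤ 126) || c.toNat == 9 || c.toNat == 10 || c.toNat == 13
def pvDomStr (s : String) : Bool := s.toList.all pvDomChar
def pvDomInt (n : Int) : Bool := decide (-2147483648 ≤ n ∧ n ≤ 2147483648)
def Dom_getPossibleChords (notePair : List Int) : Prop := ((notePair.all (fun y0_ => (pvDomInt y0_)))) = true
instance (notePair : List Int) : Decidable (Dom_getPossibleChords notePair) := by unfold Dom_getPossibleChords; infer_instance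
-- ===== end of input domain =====

-- B replaces A's per-chord rescans of the note list with a note-driven loop over a precomputed
-- pitch-class -> chord-names inverted index feeding a counter dict (objective: alternative).

-- ===== PORT A =====
def chordsList : List (String × List Int) :=
  [("Cmaj", [60, 64, 67]), ("Cmin", [60, 63, 67]), ("Cmaj7", [60, 64, 67, 71]),
   ("Dmaj", [62, 66, 69]), ("Dmin", [62, 65, 69]), ("Dmin7", [62, 65, 69, 72]),
   ("Emaj", [64, 68, 71]), ("Emin", [64, 67, 71]), ("Emin7", [64, 67, 71, 74]),
   ("Fmaj", [65, 69, 72]), ("Fmin", [65, 68, 72]), ("Fmaj7", [65, 69, 72, 76]),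
   ("Gmaj", [67, 71, 74]), ("Gmin", [67, 70, 74]), ("Gmm7", [67, 71, 74, 77]),
   ("Amaj", [69, 73, 76]), ("Amin", [69, 72, 76]), ("Amin7", [69, 72, 76, 79]),
   ("Amm7", [69, 73, 76, 79])]

def checkIfInChord (note : Int) (chord : List Int) : Bool :=
  chord.any (fun chordNote => PySem.Int.mod note 12 == PySem.Int.mod chordNote 12)

-- A's per-chord 'matchCount = sum(1 for note in notePair if checkIfInChord(note, chordNotes))'
def matchCount (notePair : List Int) (chordNotes : List Int) : Int :=
  notePair.foldl (fun s note => if checkIfInChord note chordNotes then s + 1 else s) 0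

def getPossibleChords (notePair : List Int) : List String :=
  (PySem.List.sorted
    (chordsList.foldl (fun acc p =>
      if matchCount notePair p.2 > 0 then acc ++ [(p.1, matchCount notePair p.2)] else acc) [])
    (fun x => -x.2) false).map (·.1)

-- ===== PORT B =====
-- Source B builds the index once at module load by this double loop (dedup via 'if name not in').
def pcIndex : PySem.Dict Int (List String) :=
  chordsList.foldl (fun idx p =>
    p.2.foldl (fun idx n =>
      if (idx.getD (PySem.Int.mod n 12) []).contains p.1 then idx
      else idx.insert (PySem.Int.mod n 12) (idx.getD (PySem.Int.mod n 12) [] ++ [p.1])) idx)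
    ((List.range 12).foldl (fun d pc => d.insert (pc : Int) []) PySem.Dict.empty)

-- B's counter dict: for each input note, bump every chord listed under its pitch class
def noteCounts (notePair : List Int) : PySem.Dict String Int :=
  notePair.foldl (fun d note =>
    (pcIndex.getD (PySem.Int.mod note 12) []).foldl
      (fun d name => d.insert name (d.getD name 0 + 1)) d)
    PySem.Dict.empty

def getPossibleChords_alt (notePair : List Int) : List String :=
  (PySem.List.sorted
    (chordsList.foldl (fun acc p =>
      if (noteCounts notePair).getD p.1 0 > 0
      then acc ++ [(p.1, (noteCounts notePair).getD p.1 0)] else acc) [])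
    (fun p => -p.2) false).map (·.1)

-- ===== PRECONDITION & SPEC =====
def Spec_getPossibleChords (notePair : List Int) (out : List String) : Prop := out = getPossibleChords_alt notePair
instance (notePair : List Int) (out : List String) : Decidable (Spec_getPossibleChords notePair out) := by unfold Spec_getPossibleChords; infer_instance

-- ===== CLAIM (what is proved, stated in full; the proofs are below) =====
def Claim_equal_getPossibleChords : Prop := ∀ (notePair : List Int), Dom_getPossibleChords notePair → Spec_getPossibleChords notePair (getPossibleChords notePair)

-- ===== LEMMAS AND PROOFS =====

-- the inverted index is correct: for every residue m (0..11) and chord, the index list at m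
-- holds the chord's name exactly once iff some chord note has pitch class m
set_option maxRecDepth 100000 in
theorem pcIndex_count_correct :
    ∀ m ∈ (List.range 12).map (Int.ofNat), ∀ p ∈ chordsList,
      ((pcIndex.getD m []).count p.1 : Int)
        = (if p.2.any (fun cn => m == PySem.Int.mod cn 12) then 1 else 0) := by
  decide

theorem mod12_mem (n : Int) :
    PySem.Int.mod n 12 ∈ (List.range 12).map (Int.ofNat) := by
  have h1 : 0 ≤ PySem.Int.mod n 12 := PySem.Int.mod_nonneg n (by norm_num)
  have h2 : PySem.Int.mod n 12 < 12 := PySem.Int.mod_lt n (by norm_num)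
  refine List.mem_map.mpr ⟨(PySem.Int.mod n 12).toNat, List.mem_range.mpr (by omega), ?_⟩
  simpa using Int.toNat_of_nonneg h1

theorem countP_as_sum (p : Int → Bool) (l : List Int) :
    (l.map (fun n => if p n then (1 : Int) else 0)).sum = (l.countP p : Int) := by
  induction l with
  | nil => simp
  | cons x t ih => by_cases h : p x <;> simp [h, ih, add_comm]

theorem counts_getD (notePair : List Int) (d : PySem.Dict String Int) (v : String) :
    (notePair.foldl (fun d note =>
        (pcIndex.getD (PySem.Int.mod note 12) []).foldl
          (fun d name => d.insert name (d.getD name 0 + 1)) d) d).getD v 0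
      = d.getD v 0
        + (notePair.map (fun n => ((pcIndex.getD (PySem.Int.mod n 12) []).count v : Int))).sum := by
  induction notePair generalizing d with
  | nil => simp only [List.foldl_nil, List.map_nil, List.sum_nil, add_zero]
  | cons x t ih =>
    simp only [List.foldl_cons, List.map_cons, List.sum_cons, ih,
      PySem.Dict.getD_foldl_insert_add_one]
    ring

theorem counts_eq_matchCount (notePair : List Int) :
    ∀ p ∈ chordsList, (noteCounts notePair).getD p.1 0 = matchCount notePair p.2 := by
  intro p hp
  unfold noteCounts matchCount
  rw [counts_getD, PySem.Dict.getD_empty, PySem.List.foldl_if_add_one]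
  have hmap : (notePair.map (fun n => ((pcIndex.getD (PySem.Int.mod n 12) []).count p.1 : Int)))
      = notePair.map (fun n => if checkIfInChord n p.2 then (1 : Int) else 0) := by
    apply List.map_congr_left
    intro n _
    rw [pcIndex_count_correct _ (mod12_mem n) p hp]
    simp [checkIfInChord]
  rw [hmap, countP_as_sum]

-- ===== VERDICT (by name: the statement is the Claim_ definition above) =====
theorem getPossibleChords_spec : Claim_equal_getPossibleChords := by
  intro notePair _
  show getPossibleChords notePair = getPossibleChords_alt notePair
  unfold getPossibleChords getPossibleChords_alt
  have h : chordsList.foldl (fun (acc : List (String × Int)) p =>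
        if matchCount notePair p.2 > 0 then acc ++ [(p.1, matchCount notePair p.2)] else acc) []
      = chordsList.foldl (fun acc p =>
        if (noteCounts notePair).getD p.1 0 > 0
        then acc ++ [(p.1, (noteCounts notePair).getD p.1 0)] else acc) [] := by
    apply PySem.List.foldl_congr_mem
    intro acc p hp
    rw [counts_eq_matchCount notePair p hp]
  rw [h]
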